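-- pv_equiv track=rewrite | github.com/xzd3n3k/cipher_gui | Tritheme.py | tritheme_decrypt
-- ===== SOURCE A (Python) =====
-- def tritheme_decrypt(text):
--     text = text.lower()
--     decrypted_text = ""
--
--     shift = 0
--     for letter in text:
--         if letter not in "abcdefghijklmnopqrstuvwxyz":
--             decrypted_text += letter
--
--         else:
--             a = ord(letter)
--             for x in range(shift):
--                 if a == 97:
--                     a = 123
--                 a -= 1
--             decrypted_text += chr(a)
--             shift += 1
--
--     return decrypted_text
-- ===== SOURCE B (Python) =====
-- def tritheme_decrypt(text):
--     out = []
--     shift = 0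
--     for c in text.lower():
--         if 'a' <= c <= 'z':
--             out.append(chr(97 + (ord(c) - 97 - shift) % 26))
--             shift += 1
--         else:
--             out.append(c)
--     return ''.join(out)
-- ===== Notes on version B (the rewrite author's own statement) =====
-- stated objective: faster
-- what changed: Replaced the per-letter step-by-step decrement loop (shift iterations per letter) by one modular-arithmetic formula chr(97+(ord(c)-97-shift)%26), and string concatenation by a list join.
import Mathlib
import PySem

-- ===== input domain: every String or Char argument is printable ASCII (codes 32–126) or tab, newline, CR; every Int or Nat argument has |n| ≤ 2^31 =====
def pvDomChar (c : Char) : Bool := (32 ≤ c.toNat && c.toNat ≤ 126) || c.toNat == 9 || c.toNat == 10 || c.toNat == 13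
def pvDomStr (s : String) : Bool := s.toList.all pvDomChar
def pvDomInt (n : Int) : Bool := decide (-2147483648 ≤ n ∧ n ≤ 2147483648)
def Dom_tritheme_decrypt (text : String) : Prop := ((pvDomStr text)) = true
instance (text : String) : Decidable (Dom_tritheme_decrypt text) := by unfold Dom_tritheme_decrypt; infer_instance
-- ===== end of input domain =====

-- B replaces A's per-letter decrement loop by one modular-arithmetic formula per letter.

-- ===== PORT A =====
-- literal transliteration of A: lower the text, fold with state (decrypted_text, shift);
-- non-letters appended as-is; letters run the range(shift) decrement loop with wrap at 'a'.
def triAStep (st : List Char × Int) (letter : Char) : List Char × Int :=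
  if letter ∉ "abcdefghijklmnopqrstuvwxyz".toList then
    (st.1 ++ [letter], st.2)
  else
    let a : Int := (letter.toNat : Int)
    let a := (PySem.List.pyRange 0 st.2 1).foldl
      (fun a _ => (if a = 97 then (123 : Int) else a) - 1) a
    (st.1 ++ [Char.ofNat a.toNat], st.2 + 1)

def tritheme_decrypt (text : String) : String :=
  String.ofList (((PySem.Str.lower text).toList.foldl triAStep ([], 0)).1)

-- ===== PORT B =====
-- B's code: single pass, each letter mapped by chr(97 + (ord(c) - 97 - shift) % 26), list then join.
def triBStep (st : List Char × Int) (c : Char) : List Char × Int :=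
  if 'a' ≤ c ∧ c ≤ 'z' then
    (st.1 ++ [Char.ofNat (97 + PySem.Int.mod ((c.toNat : Int) - 97 - st.2) 26).toNat], st.2 + 1)
  else
    (st.1 ++ [c], st.2)

def tritheme_decrypt_alt (text : String) : String :=
  String.ofList (((PySem.Chars.lower text.toList).foldl triBStep ([], 0)).1)

-- ===== PRECONDITION & SPEC =====
def Spec_tritheme_decrypt (text : String) (out : String) : Prop := out = tritheme_decrypt_alt text
instance (text : String) (out : String) : Decidable (Spec_tritheme_decrypt text out) := by unfold Spec_tritheme_decrypt; infer_instance

-- ===== CLAIM (what is proved, stated in full; the proofs are below) =====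
def Claim_equal_tritheme_decrypt : Prop := ∀ (text : String), Dom_tritheme_decrypt text → Spec_tritheme_decrypt text (tritheme_decrypt text)

-- ===== LEMMAS AND PROOFS =====

lemma char_eq_toNat (c d : Char) : c = d ↔ c.toNat = d.toNat := by
  constructor
  · rintro rfl; rfl
  · intro h; rw [← Char.ofNat_toNat c, ← Char.ofNat_toNat d, h]

lemma mem_alpha (c : Char) :
    c ∈ "abcdefghijklmnopqrstuvwxyz".toList ↔ 97 ≤ c.toNat ∧ c.toNat ≤ 122 := by
  simp only [show "abcdefghijklmnopqrstuvwxyz".toList =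
    ['a','b','c','d','e','f','g','h','i','j','k','l','m','n','o','p','q','r','s','t','u','v','w','x','y','z'] from rfl,
    List.mem_cons, List.not_mem_nil, or_false, char_eq_toNat,
    show ('a').toNat = 97 from rfl, show ('b').toNat = 98 from rfl, show ('c').toNat = 99 from rfl, show ('d').toNat = 100 from rfl, show ('e').toNat = 101 from rfl, show ('f').toNat = 102 from rfl, show ('g').toNat = 103 from rfl, show ('h').toNat = 104 from rfl, show ('i').toNat = 105 from rfl, show ('j').toNat = 106 from rfl, show ('k').toNat = 107 from rfl, show ('l').toNat = 108 from rfl, show ('m').toNat = 109 from rfl, show ('n').toNat = 110 from rfl, show ('o').toNat = 111 from rfl, show ('p').toNat = 112 from rfl, show ('q').toNat = 113 from rfl, show ('r').toNat = 114 from rfl, show ('s').toNat = 115 from rfl, show ('t').toNat = 116 from rfl, show ('u').toNat = 117 from rfl, show ('v').toNat = 118 from rfl, show ('w').toNat = 119 from rfl, show ('x').toNat = 120 from rfl, show ('y').toNat = 121 from rfl, show ('z').toNat = 122 from rfl]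
  omega

lemma triB_le_iff (c : Char) : ('a' ≤ c ∧ c ≤ 'z') ↔ 97 ≤ c.toNat ∧ c.toNat ≤ 122 := by
  constructor
  · rintro ⟨h1, h2⟩
    exact ⟨UInt32.le_iff_toNat_le.mp h1, UInt32.le_iff_toNat_le.mp h2⟩
  · rintro ⟨h1, h2⟩
    exact ⟨UInt32.le_iff_toNat_le.mpr h1, UInt32.le_iff_toNat_le.mpr h2⟩

-- A's inner decrement loop computes shift steps backwards with wraparound: closed form.
lemma triA_inner (n : Nat) (a : Int) (h1 : 97 ≤ a) (h2 : a ≤ 122) :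
    (PySem.List.pyRange 0 (n : Int) 1).foldl
      (fun a _ => (if a = 97 then (123 : Int) else a) - 1) a
      = 97 + (a - 97 - n) % 26 := by
  induction n with
  | zero => simp [PySem.List.pyRange_one_eq_nil]; omega
  | succ n ih =>
    rw [show ((n + 1 : Nat) : Int) = (n : Int) + 1 by push_cast; ring,
      PySem.List.pyRange_one_succ_right (by positivity), List.foldl_append, List.foldl_cons,
      List.foldl_nil, ih]
    have hm : 0 ≤ (a - 97 - n) % 26 ∧ (a - 97 - n) % 26 < 26 :=
      ⟨Int.emod_nonneg _ (by norm_num), Int.emod_lt_of_pos _ (by norm_num)⟩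
    split_ifs with h <;> omega

lemma tri_fold_eq (L : List Char) (acc : List Char) (n : Nat) :
    L.foldl triAStep (acc, (n : Int)) = L.foldl triBStep (acc, (n : Int)) := by
  induction L generalizing acc n with
  | nil => rfl
  | cons c L ih =>
    simp only [List.foldl_cons]
    by_cases h : 97 ≤ c.toNat ∧ c.toNat ≤ 122
    · have hA : triAStep (acc, (n : Int)) c
          = (acc ++ [Char.ofNat (97 + ((c.toNat : Int) - 97 - n) % 26).toNat], (n : Int) + 1) := by
        unfold triAStep
        rw [if_neg (not_not_intro ((mem_alpha c).mpr h))]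
        simp only
        rw [triA_inner n _ (by exact_mod_cast h.1) (by exact_mod_cast h.2)]
      have hB : triBStep (acc, (n : Int)) c
          = (acc ++ [Char.ofNat (97 + ((c.toNat : Int) - 97 - n) % 26).toNat], (n : Int) + 1) := by
        unfold triBStep
        rw [if_pos ((triB_le_iff c).mpr h),
          PySem.Int.mod_eq_emod_of_pos (by norm_num : (0:Int) < 26)]
      rw [hA, hB, show ((n : Int) + 1) = ((n + 1 : Nat) : Int) by push_cast; ring, ih]
    · have hA : triAStep (acc, (n : Int)) c = (acc ++ [c], (n : Int)) := by
        unfold triAStep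
        rw [if_pos (fun hmem => h ((mem_alpha c).mp hmem))]
      have hB : triBStep (acc, (n : Int)) c = (acc ++ [c], (n : Int)) := by
        unfold triBStep
        rw [if_neg (fun hle => h ((triB_le_iff c).mp hle))]
      rw [hA, hB, ih]

-- ===== VERDICT (by name: the statement is the Claim_ definition above) =====
theorem tritheme_decrypt_spec : Claim_equal_tritheme_decrypt := by
  intro text _
  unfold Spec_tritheme_decrypt tritheme_decrypt tritheme_decrypt_alt
  rw [PySem.Str.toList_lower]
  rw [show (0 : Int) = ((0 : Nat) : Int) from rfl, tri_fold_eq]
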